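-- pv_equiv track=rewrite | github.com/thomasherzog/AdventOfFPGA2025 | src/day03/tb/day03_stimuli_gen.py | gen_expected_outputs_p1
-- ===== SOURCE A (Python) =====
-- def gen_expected_outputs_p1(stimuli):
--     outputs = []
--     for number in stimuli:
--         left_digit = 0
--         right_digit = 0
--         for digit in number:
--             if left_digit < right_digit:
--                 left_digit = right_digit
--                 right_digit = 0
--             if int(digit) > right_digit:
--                 right_digit = int(digit)
--         outputs.append(next(reversed(outputs), 0) +
--                        10 * left_digit + right_digit)
--     return outputs
-- ===== SOURCE B (Python) =====
-- def _value(number):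
--     # value = max over positions j of 10*(max of digits before j) + digit_j
--     # (prefix-max scan; 0 for the empty string)
--     prefix_max = 0
--     best = 0
--     for digit in number:
--         d = int(digit)
--         best = max(best, 10 * prefix_max + d)
--         prefix_max = max(prefix_max, d)
--     return best
--
--
-- def gen_expected_outputs_p1(stimuli):
--     totals = []
--     running = 0
--     for number in stimuli:
--         running += _value(number)
--         totals.append(running)
--     return totals
-- ===== Notes on version B (the rewrite author's own statement) =====
-- stated objective: alternative
-- what changed: B computes each number's value by a different algorithm: the maximum over positions j of 10*(prefix maximum of the earlier digits) + digit_j, maintained by a prefix-max/best scan, instead of A's two-register shift state machine; the outputs are then built as running sums with an int accumulator instead of re-reading the output list's last element via next(reversed(outputs), 0).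
import Mathlib
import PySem

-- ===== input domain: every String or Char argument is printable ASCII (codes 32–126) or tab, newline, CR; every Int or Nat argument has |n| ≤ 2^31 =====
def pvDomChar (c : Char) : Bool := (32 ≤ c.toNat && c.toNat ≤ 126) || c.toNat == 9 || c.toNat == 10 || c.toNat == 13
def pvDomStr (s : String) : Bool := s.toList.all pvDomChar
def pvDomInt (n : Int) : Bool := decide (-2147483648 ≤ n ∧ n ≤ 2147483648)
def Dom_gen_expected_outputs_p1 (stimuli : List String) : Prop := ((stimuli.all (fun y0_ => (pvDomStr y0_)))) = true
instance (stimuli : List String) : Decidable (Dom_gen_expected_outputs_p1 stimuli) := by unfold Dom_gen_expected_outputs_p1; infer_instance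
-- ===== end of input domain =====

-- B computes each number's value by a different algorithm (max over positions of 10*(prefix max of
-- earlier digits)+digit, via a prefix-max/best scan) instead of A's two-register shift state machine,
-- and sums the values with an int running total (objective: alternative).
-- ===== PORT A =====
def gen_expected_outputs_p1 (stimuli : List String) : List Int :=
  stimuli.foldl
    (fun outputs number =>
      let st := number.toList.foldl
        (fun (st : Int × Int) digit =>
          let st := if st.1 < st.2 then (st.2, (0 : Int)) else st
          -- int(digit); ValueError (none) is excluded by Pre_
          let d := (PySem.Int.ofChars? [digit]).getD 0
          if d > st.2 then (st.1, d) else st)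
        ((0 : Int), (0 : Int))
      outputs ++ [outputs.getLast?.getD 0 + 10 * st.1 + st.2])
    []

-- ===== PORT B =====
def pvValue (number : String) : Int :=
  (number.toList.foldl
    (fun (s : Int × Int) digit =>
      -- int(digit); ValueError (none) is excluded by Pre_
      let d := (PySem.Int.ofChars? [digit]).getD 0
      (max s.1 d, max s.2 (10 * s.1 + d)))
    ((0 : Int), (0 : Int))).2

def gen_expected_outputs_p1_alt (stimuli : List String) : List Int :=
  (stimuli.foldl
    (fun (st : List Int × Int) number =>
      let running := st.2 + pvValue number
      (st.1 ++ [running], running))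
    (([] : List Int), (0 : Int))).1

-- ===== PRECONDITION & SPEC =====
-- Pre_ excludes exactly the inputs on which A raises: within the ASCII domain, int(digit) on a single
-- character raises ValueError unless that character is a decimal digit.
def Pre_gen_expected_outputs_p1 (stimuli : List String) : Prop :=
  (stimuli.all (fun s => s.toList.all (fun c => c.isDigit))) = true
instance (stimuli : List String) : Decidable (Pre_gen_expected_outputs_p1 stimuli) := by
  unfold Pre_gen_expected_outputs_p1; infer_instance
def pvWitness_gen_expected_outputs_p1 : List String := ["34", "12", "9"]
def Spec_gen_expected_outputs_p1 (stimuli : List String) (out : List Int) : Prop := out = gen_expected_outputs_p1_alt stimuli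
instance (stimuli : List String) (out : List Int) : Decidable (Spec_gen_expected_outputs_p1 stimuli out) := by unfold Spec_gen_expected_outputs_p1; infer_instance

-- ===== CLAIM =====
def Claim_equal_gen_expected_outputs_p1 : Prop := ∀ (stimuli : List String), Dom_gen_expected_outputs_p1 stimuli → Pre_gen_expected_outputs_p1 stimuli → Spec_gen_expected_outputs_p1 stimuli (gen_expected_outputs_p1 stimuli)

-- ===== LEMMAS AND PROOFS =====
-- named copies of the two inner loop bodies (definitionally equal to the lambdas in the ports)
def pvAIn (st : Int × Int) (digit : Char) : Int × Int :=
  let st := if st.1 < st.2 then (st.2, (0 : Int)) else st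
  let d := (PySem.Int.ofChars? [digit]).getD 0
  if d > st.2 then (st.1, d) else st

def pvBIn (s : Int × Int) (digit : Char) : Int × Int :=
  let d := (PySem.Int.ofChars? [digit]).getD 0
  (max s.1 d, max s.2 (10 * s.1 + d))

-- a decimal-digit character parses with int() to a value in 0..9
theorem pvDigitVal {c : Char} (hdig : c.isDigit = true) :
    0 ≤ (PySem.Int.ofChars? [c]).getD 0 ∧ (PySem.Int.ofChars? [c]).getD 0 ≤ 9 := by
  have hb : 48 ≤ c.toNat ∧ c.toNat ≤ 57 := by
    simp only [Char.isDigit, decide_eq_true_eq, Bool.and_eq_true] at hdig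
    exact ⟨hdig.1, hdig.2⟩
  have hlo : 48 ≤ c.toNat := hb.1
  have hhi : c.toNat ≤ 57 := hb.2
  have hc : Char.ofNat c.toNat = c := Char.ofNat_toNat c
  interval_cases h : c.toNat <;> (rw [← hc]; decide)

theorem pvInner (cs : List Char)
    (h : ∀ c ∈ cs, 0 ≤ (PySem.Int.ofChars? [c]).getD 0 ∧ (PySem.Int.ofChars? [c]).getD 0 ≤ 9) :
    ∀ l r : Int, 0 ≤ l → l ≤ 9 → 0 ≤ r → r ≤ 9 →
      cs.foldl pvBIn (max l r, 10 * l + r)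
        = (max (cs.foldl pvAIn (l, r)).1 (cs.foldl pvAIn (l, r)).2,
           10 * (cs.foldl pvAIn (l, r)).1 + (cs.foldl pvAIn (l, r)).2)
      ∧ 0 ≤ (cs.foldl pvAIn (l, r)).1 ∧ (cs.foldl pvAIn (l, r)).1 ≤ 9
      ∧ 0 ≤ (cs.foldl pvAIn (l, r)).2 ∧ (cs.foldl pvAIn (l, r)).2 ≤ 9 := by
  induction cs with
  | nil => intro l r h1 h2 h3 h4; exact ⟨rfl, h1, h2, h3, h4⟩
  | cons c cs ih =>
      intro l r h1 h2 h3 h4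
      obtain ⟨hd1, hd2⟩ := h c (by simp)
      have ih' := fun l r a b c d => ih (fun x hx => h x (by simp [hx])) l r a b c d
      simp only [List.foldl_cons]
      set d := (PySem.Int.ofChars? [c]).getD 0 with hd
      have hstep : pvBIn (max l r, 10 * l + r) c
          = (max (pvAIn (l, r) c).1 (pvAIn (l, r) c).2,
             10 * (pvAIn (l, r) c).1 + (pvAIn (l, r) c).2)
          ∧ 0 ≤ (pvAIn (l, r) c).1 ∧ (pvAIn (l, r) c).1 ≤ 9
          ∧ 0 ≤ (pvAIn (l, r) c).2 ∧ (pvAIn (l, r) c).2 ≤ 9 := by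
        simp only [pvAIn, pvBIn, ← hd]
        split_ifs <;> simp_all <;> omega
      rw [hstep.1]
      exact ih' _ _ hstep.2.1 hstep.2.2.1 hstep.2.2.2.1 hstep.2.2.2.2

theorem pvValue_eq (number : String)
    (h : ∀ c ∈ number.toList, 0 ≤ (PySem.Int.ofChars? [c]).getD 0 ∧ (PySem.Int.ofChars? [c]).getD 0 ≤ 9) :
    pvValue number
      = 10 * (number.toList.foldl pvAIn ((0 : Int), (0 : Int))).1
        + (number.toList.foldl pvAIn ((0 : Int), (0 : Int))).2 := by
  have := (pvInner number.toList h 0 0 (by norm_num) (by norm_num) (by norm_num) (by norm_num)).1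
  norm_num at this
  simp only [pvValue]
  show (number.toList.foldl pvBIn ((0 : Int), (0 : Int))).2 = _
  rw [this]

theorem pvOuter (l : List String)
    (h : ∀ s ∈ l, ∀ c ∈ s.toList, 0 ≤ (PySem.Int.ofChars? [c]).getD 0 ∧ (PySem.Int.ofChars? [c]).getD 0 ≤ 9) :
    ∀ (acc : List Int) (t : Int), t = acc.getLast?.getD 0 →
      l.foldl
        (fun (st : List Int × Int) number =>
          let running := st.2 + pvValue number
          (st.1 ++ [running], running))
        (acc, t)
      = (l.foldl (fun outputs number =>
            let st := number.toList.foldl pvAIn ((0 : Int), (0 : Int))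
            outputs ++ [outputs.getLast?.getD 0 + 10 * st.1 + st.2]) acc,
         (l.foldl (fun outputs number =>
            let st := number.toList.foldl pvAIn ((0 : Int), (0 : Int))
            outputs ++ [outputs.getLast?.getD 0 + 10 * st.1 + st.2]) acc).getLast?.getD 0) := by
  induction l with
  | nil => intro acc t ht; simp [ht]
  | cons n l ih =>
      intro acc t ht
      have hv := pvValue_eq n (h n (by simp))
      simp only [List.foldl_cons]
      rw [hv, ht, ← add_assoc]
      exact ih (fun s hs => h s (by simp [hs])) _ _ (by simp)

-- ===== VERDICT =====
theorem gen_expected_outputs_p1_spec : Claim_equal_gen_expected_outputs_p1 := by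
  intro stimuli _ hpre
  unfold Spec_gen_expected_outputs_p1 gen_expected_outputs_p1 gen_expected_outputs_p1_alt
  have h : ∀ s ∈ stimuli, ∀ c ∈ s.toList,
      0 ≤ (PySem.Int.ofChars? [c]).getD 0 ∧ (PySem.Int.ofChars? [c]).getD 0 ≤ 9 := by
    unfold Pre_gen_expected_outputs_p1 at hpre
    simp only [List.all_eq_true] at hpre
    intro s hs c hc
    exact pvDigitVal (hpre s hs c hc)
  have hrw : (fun (st : Int × Int) digit =>
          let st := if st.1 < st.2 then (st.2, (0 : Int)) else st
          let d := (PySem.Int.ofChars? [digit]).getD 0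
          if d > st.2 then (st.1, d) else st) = pvAIn := rfl
  rw [hrw, pvOuter stimuli h [] 0 (by simp)]
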